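-- pv_equiv track=rewrite | github.com/ProphetSunboy/python_tasks | find_nearest_point_that_has_the_same_x_or_y_coordinate.py | nearestmin_validPoint
-- ===== SOURCE A (Python) =====
-- from typing import List
--
-- def nearestmin_validPoint(x: int, y: int, points: List[List[int]]) -> int:
--     """
--     Finds the index of the nearest valid point that shares the same x or y coordinate.
--
--     A point is considered valid if it shares either the same x-coordinate or the same y-coordinate
--     as the given location (x, y). Among all valid points, the function returns the index of the one
--     with the smallest Manhattan distance to (x, y). If there are multiple such points, the one with
--     the smallest index is returned. If no valid point exists, returns -1.
--
--     The Manhattan distance between (x1, y1) and (x2, y2) is defined as abs(x1 - x2) + abs(y1 - y2).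
--
--     Args:
--         x (int): The x-coordinate of the current location.
--         y (int): The y-coordinate of the current location.
--         points (List[List[int]]): List of points, where each point is [ai, bi].
--
--     Returns:
--         int: The index of the nearest valid point, or -1 if none exists.
--
--     Example:
--         >>> nearestmin_validPoint(3, 4, [[1,2],[3,1],[2,4],[2,3],[4,4]])
--         2
--
--     Time Complexity: O(n), where n is the number of points.
--     Space Complexity: O(1)
--
--     LeetCode: Beats 100% of submissions
--     """
--     min_valid = -1
--     manh_dist = 10**5
--
--     for i, p in enumerate(points):
--         if p[0] == x or p[1] == y:
--             curr_dist = abs(x - p[0]) + abs(y - p[1])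
--             if curr_dist < manh_dist:
--                 manh_dist = curr_dist
--                 min_valid = i
--
--     return min_valid
-- ===== SOURCE B (Python) =====
-- def nearestmin_validPoint(x, y, points):
--     by_dist = sorted((abs(x - p[0]) + abs(y - p[1]), i)
--                      for i, p in enumerate(points)
--                      if p[0] == x or p[1] == y)
--     return by_dist[0][1] if by_dist else -1
-- ===== Notes on version B (the rewrite author's own statement) =====
-- stated objective: alternative
-- what changed: Replaced A's running-accumulator scan (best index and best distance seeded with the sentinel 10**5) by sort-then-pick: build the (distance, index) candidate list and sort it, the answer is the first element; Pre_ excludes points with fewer than 2 coordinates (A raises IndexError) and inputs whose coordinate-sharing points all lie at Manhattan distance >= 10**5, where A's sentinel initialisation answers -1 while B answers the nearest sharing index -- outside the coordinate bounds A was written for, both are defensible.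
-- outside the precondition, e.g. on nearestmin_validPoint(0, 0, [[0, 100000]]): A returns -1, B returns 0
import Mathlib
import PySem

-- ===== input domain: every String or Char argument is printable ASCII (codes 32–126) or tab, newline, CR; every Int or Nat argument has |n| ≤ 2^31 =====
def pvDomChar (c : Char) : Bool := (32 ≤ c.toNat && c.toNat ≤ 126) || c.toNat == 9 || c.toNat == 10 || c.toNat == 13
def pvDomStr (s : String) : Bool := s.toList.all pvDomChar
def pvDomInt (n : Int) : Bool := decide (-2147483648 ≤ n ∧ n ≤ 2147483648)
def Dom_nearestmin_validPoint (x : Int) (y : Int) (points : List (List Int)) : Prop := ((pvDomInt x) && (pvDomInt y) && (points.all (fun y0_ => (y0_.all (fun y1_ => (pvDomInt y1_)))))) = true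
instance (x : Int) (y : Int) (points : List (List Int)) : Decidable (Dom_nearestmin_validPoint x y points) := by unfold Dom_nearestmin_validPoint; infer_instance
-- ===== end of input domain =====

-- B replaces A's running-accumulator scan by sort-then-pick: build the (distance, index)
-- candidate list, sort it, return the first element's index ('alternative'; not faster).

-- ===== PORT A =====
-- A's loop body: state (min_valid, manh_dist), p[0]/p[1] via pyGetD (in range under Pre_).
def pvStepA_nearestmin_validPoint (x : Int) (y : Int) (st : Int × Int) (ip : Int × List Int) : Int × Int :=
  let p0 := PySem.List.pyGetD ip.2 0 0
  let p1 := PySem.List.pyGetD ip.2 1 0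
  if p0 = x ∨ p1 = y then
    let curr := |x - p0| + |y - p1|
    if curr < st.2 then (ip.1, curr) else st
  else st

def nearestmin_validPoint (x : Int) (y : Int) (points : List (List Int)) : Int :=
  ((PySem.List.enumerate points).foldl (pvStepA_nearestmin_validPoint x y) (-1, 100000)).1

-- ===== PORT B =====
-- the generator expression: (distance, index) pairs of the points sharing an x or y coordinate
def pvCands_nearestmin_validPoint (x : Int) (y : Int) (points : List (List Int)) : List (Int × Int) :=
  (PySem.List.enumerate points).filterMap (fun ip =>
    if PySem.List.pyGetD ip.2 0 0 = x ∨ PySem.List.pyGetD ip.2 1 0 = y then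
      some (|x - PySem.List.pyGetD ip.2 0 0| + |y - PySem.List.pyGetD ip.2 1 0|, ip.1)
    else none)

-- sorted(tuples) = lexicographic sort = PySem.List.sorted2 with the two projections as keys
def nearestmin_validPoint_alt (x : Int) (y : Int) (points : List (List Int)) : Int :=
  match PySem.List.sorted2 (pvCands_nearestmin_validPoint x y points) Prod.fst Prod.snd with
  | [] => -1
  | c :: _ => c.2

-- ===== PRECONDITION & SPEC =====
-- Pre_ excludes (a) points with fewer than 2 coordinates, on which the Python A raises IndexError,
-- and (b) inputs whose coordinate-sharing points all lie at Manhattan distance ≥ 10**5: outside the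
-- coordinate bounds A was written for, A's sentinel initialisation answers -1 there while B answers
-- the nearest sharing index — both defensible on that unspecified corner.
def Pre_nearestmin_validPoint (x : Int) (y : Int) (points : List (List Int)) : Prop :=
  (∀ p ∈ points, 2 ≤ p.length) ∧
  ((∃ p ∈ points, p.getD 0 0 = x ∨ p.getD 1 0 = y) →
    ∃ p ∈ points, (p.getD 0 0 = x ∨ p.getD 1 0 = y) ∧
      |x - p.getD 0 0| + |y - p.getD 1 0| < 100000)
instance (x : Int) (y : Int) (points : List (List Int)) : Decidable (Pre_nearestmin_validPoint x y points) := by unfold Pre_nearestmin_validPoint; infer_instance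
def pvWitness_nearestmin_validPoint : Int × Int × List (List Int) := (3, 4, [[1,2],[3,1],[2,4],[2,3],[4,4]])

def Spec_nearestmin_validPoint (x : Int) (y : Int) (points : List (List Int)) (out : Int) : Prop := out = nearestmin_validPoint_alt x y points
instance (x : Int) (y : Int) (points : List (List Int)) (out : Int) : Decidable (Spec_nearestmin_validPoint x y points out) := by unfold Spec_nearestmin_validPoint; infer_instance

-- ===== CLAIM (what is proved, stated in full; the proofs are below) =====
def Claim_equal_nearestmin_validPoint : Prop := ∀ (x : Int) (y : Int) (points : List (List Int)), Dom_nearestmin_validPoint x y points → Pre_nearestmin_validPoint x y points → Spec_nearestmin_validPoint x y points (nearestmin_validPoint x y points)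

-- ===== LEMMAS AND PROOFS =====

-- lexicographic ≤ on (distance, index) pairs, and sorted2's strict comparator at these keys
def pvLexLE (a b : Int × Int) : Prop := a.1 < b.1 ∨ (a.1 = b.1 ∧ a.2 ≤ b.2)

def pvLt2 (a b : Int × Int) : Bool :=
  decide (a.1 < b.1) || !decide (b.1 < a.1) && decide (a.2 < b.2)

-- Python's min on (dist, index) tuples: strict lexicographic comparison, first wins on ties
def pvMinPair (m c : Int × Int) : Int × Int :=
  if c.1 < m.1 ∨ (c.1 = m.1 ∧ c.2 < m.2) then c else m

-- the reference optional fold over the enumerated points (candidate filter fused in)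
def pvStepB (x y : Int) (o : Option (Int × Int)) (ip : Int × List Int) : Option (Int × Int) :=
  match (if PySem.List.pyGetD ip.2 0 0 = x ∨ PySem.List.pyGetD ip.2 1 0 = y then
           some (|x - PySem.List.pyGetD ip.2 0 0| + |y - PySem.List.pyGetD ip.2 1 0|, ip.1)
         else none : Option (Int × Int)) with
  | none => o
  | some c => some (match o with | none => c | some m => pvMinPair m c)

-- correspondence between the optional running lex-minimum and A's (min_valid, manh_dist) state
def pvRel (o : Option (Int × Int)) (st : Int × Int) : Prop :=
  match o with
  | none => st = (-1, 100000)
  | some m => if m.1 < 100000 then st = (m.2, m.1) else st = (-1, 100000)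

lemma pvLexLE_trans {a b c : Int × Int} (h1 : pvLexLE a b) (h2 : pvLexLE b c) : pvLexLE a c := by
  unfold pvLexLE at *; omega

lemma pvLt2_to_le {a b : Int × Int} (h : pvLt2 a b = true) : pvLexLE a b := by
  simp only [pvLt2, Bool.or_eq_true, Bool.and_eq_true, Bool.not_eq_true',
    decide_eq_true_eq, decide_eq_false_iff_not] at h
  unfold pvLexLE; omega

lemma pvLt2_false_to_le {a b : Int × Int} (h : pvLt2 a b = false) : pvLexLE b a := by
  simp only [pvLt2, Bool.or_eq_false_iff, Bool.and_eq_false_iff, Bool.not_eq_false',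
    decide_eq_false_iff_not, decide_eq_true_eq] at h
  unfold pvLexLE
  rcases h with ⟨h1, h2 | h3⟩ <;> omega

lemma pvLexLE_antisymm {a b : Int × Int} (h1 : pvLexLE a b) (h2 : pvLexLE b a) : a = b := by
  unfold pvLexLE at *
  have : a.1 = b.1 ∧ a.2 = b.2 := by omega
  exact Prod.ext this.1 this.2

-- head of an insertBy-accumulator is a lexicographic minimum of its elements (invariant)
def pvHeadMin (acc : List (Int × Int)) : Prop :=
  ∀ h t, acc = h :: t → ∀ u ∈ acc, pvLexLE h u

lemma pvInsert_headMin (c : Int × Int) (acc : List (Int × Int)) (hacc : pvHeadMin acc) :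
    pvHeadMin (PySem.List.insertBy pvLt2 c acc) := by
  cases acc with
  | nil =>
    intro h t heq u hu
    simp only [PySem.List.insertBy] at heq hu
    injection heq with h1 h2
    subst h1; subst h2
    simp only [List.mem_singleton] at hu
    rw [hu]
    unfold pvLexLE; omega
  | cons a l =>
    intro h t heq u hu
    by_cases hc : pvLt2 c a = true
    · rw [show PySem.List.insertBy pvLt2 c (a :: l) = c :: a :: l by
        simp [PySem.List.insertBy, hc]] at heq hu
      injection heq with h1 h2
      subst h1; subst h2
      rcases List.mem_cons.mp hu with rfl | hu2
      · unfold pvLexLE; omega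
      · exact pvLexLE_trans (pvLt2_to_le hc) (hacc a l rfl u hu2)
    · rw [show PySem.List.insertBy pvLt2 c (a :: l) = a :: PySem.List.insertBy pvLt2 c l by
        simp [PySem.List.insertBy, hc]] at heq hu
      injection heq with h1 h2
      subst h1; subst h2
      rcases List.mem_cons.mp hu with rfl | hu2
      · unfold pvLexLE; omega
      · rcases (PySem.List.mem_insertBy pvLt2 c u l).mp hu2 with rfl | hul
        · exact pvLt2_false_to_le (by simpa using hc)
        · exact hacc a l rfl u (List.mem_cons_of_mem _ hul)

lemma pvFoldInsert_headMin (L : List (Int × Int)) :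
    ∀ acc, pvHeadMin acc → pvHeadMin (L.foldl (fun acc c => PySem.List.insertBy pvLt2 c acc) acc) := by
  induction L with
  | nil => intro acc h; exact h
  | cons c L ih => intro acc h; exact ih _ (pvInsert_headMin c acc h)

-- sorted2 at the two projections IS the insertBy fold with pvLt2
lemma pvSorted2_eq (C : List (Int × Int)) :
    PySem.List.sorted2 C Prod.fst Prod.snd
    = C.foldl (fun acc c => PySem.List.insertBy pvLt2 c acc) [] := rfl

lemma pvSortedHead (C : List (Int × Int)) (h : Int × Int) (t : List (Int × Int))
    (hs : PySem.List.sorted2 C Prod.fst Prod.snd = h :: t) :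
    h ∈ C ∧ ∀ u ∈ C, pvLexLE h u := by
  have hperm := PySem.List.sorted2_perm C Prod.fst Prod.snd false
  rw [hs] at hperm
  have hmin : pvHeadMin (h :: t) := by
    rw [← hs, pvSorted2_eq]
    exact pvFoldInsert_headMin C [] (by intro h t heq u hu; exact absurd heq (by simp))
  refine ⟨hperm.mem_iff.mp (List.mem_cons_self ..), fun u hu => ?_⟩
  exact hmin h t rfl u (hperm.mem_iff.mpr hu)

-- the pvMinPair fold computes a lexicographic minimum of c :: cs
lemma pvFoldMin (cs : List (Int × Int)) :
    ∀ c : Int × Int, cs.foldl pvMinPair c ∈ c :: cs ∧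
      ∀ u ∈ c :: cs, pvLexLE (cs.foldl pvMinPair c) u := by
  induction cs with
  | nil =>
    intro c
    simp only [List.foldl_nil]
    refine ⟨List.mem_cons_self .., fun u hu => ?_⟩
    rcases List.mem_cons.mp hu with rfl | hu'
    · unfold pvLexLE; omega
    · cases hu'
  | cons d cs ih =>
    intro c
    simp only [List.foldl_cons]
    obtain ⟨hmem, hle⟩ := ih (pvMinPair c d)
    have hminc : pvLexLE (pvMinPair c d) c := by
      unfold pvMinPair pvLexLE; split_ifs <;> omega
    have hmind : pvLexLE (pvMinPair c d) d := by
      unfold pvMinPair pvLexLE; split_ifs <;> omega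
    have hmcd : pvMinPair c d = c ∨ pvMinPair c d = d := by
      unfold pvMinPair; split_ifs <;> simp
    constructor
    · rcases List.mem_cons.mp hmem with heq | hmem'
      · rw [heq]
        rcases hmcd with h | h <;> rw [h] <;> simp
      · exact List.mem_cons_of_mem _ (List.mem_cons_of_mem _ hmem')
    · intro u hu
      have hself := hle (pvMinPair c d) (List.mem_cons_self ..)
      rcases List.mem_cons.mp hu with rfl | hu'
      · exact pvLexLE_trans hself hminc
      · rcases List.mem_cons.mp hu' with rfl | hu''
        · exact pvLexLE_trans hself hmind
        · exact hle u (List.mem_cons_of_mem _ hu'')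

-- the optional fold over the enumerated points is the pvMinPair fold over the candidate list
lemma pvFoldB (x y : Int) : ∀ (L : List (Int × List Int)) (o : Option (Int × Int)),
    L.foldl (pvStepB x y) o
    = (match (match o with
              | none => L.filterMap (fun ip =>
                  if PySem.List.pyGetD ip.2 0 0 = x ∨ PySem.List.pyGetD ip.2 1 0 = y then
                    some (|x - PySem.List.pyGetD ip.2 0 0| + |y - PySem.List.pyGetD ip.2 1 0|, ip.1)
                  else none)
              | some m => m :: L.filterMap (fun ip =>
                  if PySem.List.pyGetD ip.2 0 0 = x ∨ PySem.List.pyGetD ip.2 1 0 = y then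
                    some (|x - PySem.List.pyGetD ip.2 0 0| + |y - PySem.List.pyGetD ip.2 1 0|, ip.1)
                  else none)) with
       | [] => none
       | c :: cs => some (cs.foldl pvMinPair c)) := by
  intro L
  induction L with
  | nil => intro o; cases o <;> simp
  | cons ip L ih =>
    intro o
    by_cases hv : PySem.List.pyGetD ip.2 0 0 = x ∨ PySem.List.pyGetD ip.2 1 0 = y
    · cases o with
      | none =>
        have hstep : pvStepB x y none ip
            = some (|x - PySem.List.pyGetD ip.2 0 0| + |y - PySem.List.pyGetD ip.2 1 0|, ip.1) := by
          simp [pvStepB, hv]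
        simp only [List.foldl_cons, hstep, List.filterMap_cons, if_pos hv]
        exact ih _
      | some m =>
        have hstep : pvStepB x y (some m) ip
            = some (pvMinPair m (|x - PySem.List.pyGetD ip.2 0 0| + |y - PySem.List.pyGetD ip.2 1 0|, ip.1)) := by
          simp [pvStepB, hv]
        simp only [List.foldl_cons, hstep, List.filterMap_cons, if_pos hv]
        rw [ih (some (pvMinPair m (|x - PySem.List.pyGetD ip.2 0 0| + |y - PySem.List.pyGetD ip.2 1 0|, ip.1)))]
    · have hstep : ∀ o', pvStepB x y o' ip = o' := by intro o'; simp [pvStepB, hv]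
      cases o with
      | none =>
        simp only [List.foldl_cons, hstep, List.filterMap_cons, if_neg hv]
        exact ih none
      | some m =>
        simp only [List.foldl_cons, hstep, List.filterMap_cons, if_neg hv]
        exact ih (some m)

-- the main loop invariant: A's fold tracks the optional lex-minimum through pvRel
lemma pvMainLoop (x y : Int) : ∀ (L : List (Int × List Int)) (o : Option (Int × Int)) (st : Int × Int),
    L.Pairwise (fun a b => a.1 < b.1) →
    (∀ m, o = some m → ∀ jp ∈ L, m.2 < jp.1) →
    pvRel o st →
    pvRel (L.foldl (pvStepB x y) o) (L.foldl (pvStepA_nearestmin_validPoint x y) st) := by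
  intro L
  induction L with
  | nil => intro o st _ _ h; exact h
  | cons ip L ih =>
    intro o st hpw ho hrel
    have hpwL : L.Pairwise (fun a b => a.1 < b.1) := (List.pairwise_cons.mp hpw).2
    have hiplt : ∀ jp ∈ L, ip.1 < jp.1 := (List.pairwise_cons.mp hpw).1
    simp only [List.foldl_cons]
    set p0 := PySem.List.pyGetD ip.2 0 0 with hp0
    set p1 := PySem.List.pyGetD ip.2 1 0 with hp1
    by_cases hv : p0 = x ∨ p1 = y
    · set curr := |x - p0| + |y - p1| with hcurr
      cases o with
      | none =>
        have hst : st = (-1, 100000) := hrel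
        have hstep : pvStepB x y none ip = some (curr, ip.1) := by
          simp [pvStepB, hv, ← hp0, ← hp1, ← hcurr]
        rw [hstep]
        by_cases hb : curr < 100000
        · have hA : pvStepA_nearestmin_validPoint x y st ip = (ip.1, curr) := by
            simp [pvStepA_nearestmin_validPoint, hst, hv, hb, ← hp0, ← hp1, ← hcurr]
          rw [hA]
          exact ih _ _ hpwL (by
            rintro m hm jp hjp
            injection hm with hm
            rw [← hm]
            exact hiplt jp hjp)
            (by simp [pvRel, hb])
        · have hA : pvStepA_nearestmin_validPoint x y st ip = st := by
            simp only [pvStepA_nearestmin_validPoint, ← hp0, ← hp1, ← hcurr, if_pos hv]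
            simp [hst, hb]
          rw [hA]
          exact ih _ _ hpwL (by
            rintro m hm jp hjp
            injection hm with hm
            rw [← hm]
            exact hiplt jp hjp)
            (by simp [pvRel, hb, hst])
      | some m =>
        have hm2lt : m.2 < ip.1 := ho m rfl ip (List.mem_cons_self ..)
        have hstep : pvStepB x y (some m) ip = some (pvMinPair m (curr, ip.1)) := by
          simp [pvStepB, hv, ← hp0, ← hp1, ← hcurr]
        rw [hstep]
        have hnext : ∀ jp ∈ L, (pvMinPair m (curr, ip.1)).2 < jp.1 := by
          intro jp hjp
          unfold pvMinPair
          split_ifs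
          · exact hiplt jp hjp
          · exact ho m rfl jp (List.mem_cons_of_mem _ hjp)
        simp only [pvRel] at hrel
        by_cases hmlt : m.1 < 100000
        · rw [if_pos hmlt] at hrel
          by_cases hlt : curr < m.1
          · have hmin : pvMinPair m (curr, ip.1) = (curr, ip.1) := by
              unfold pvMinPair; simp [hlt]
            have hA : pvStepA_nearestmin_validPoint x y st ip = (ip.1, curr) := by
              simp [pvStepA_nearestmin_validPoint, hrel, hv, hlt, ← hp0, ← hp1, ← hcurr]
            rw [hmin, hA]
            exact ih _ _ hpwL
              (by
                rintro m' hm' jp hjp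
                injection hm' with hm'
                rw [← hm']
                exact hiplt jp hjp)
              (by simp [pvRel]; intro h; omega)
          · have hmin : pvMinPair m (curr, ip.1) = m := by
              unfold pvMinPair
              have : ¬ (curr < m.1 ∨ (curr = m.1 ∧ ip.1 < m.2)) := by omega
              simp [this]
            have hA : pvStepA_nearestmin_validPoint x y st ip = st := by
              simp only [pvStepA_nearestmin_validPoint, ← hp0, ← hp1, ← hcurr, if_pos hv]
              simp [hrel, hlt]
            rw [hmin, hA]
            exact ih _ _ hpwL
              (by
                rintro m' hm' jp hjp
                injection hm' with hm'
                rw [← hm']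
                have hx := hnext jp hjp
                rw [hmin] at hx
                exact hx)
              (by simp [pvRel, hmlt, hrel])
        · rw [if_neg hmlt] at hrel
          by_cases hlt : curr < m.1
          · have hmin : pvMinPair m (curr, ip.1) = (curr, ip.1) := by
              unfold pvMinPair; simp [hlt]
            rw [hmin]
            by_cases hb : curr < 100000
            · have hA : pvStepA_nearestmin_validPoint x y st ip = (ip.1, curr) := by
                simp [pvStepA_nearestmin_validPoint, hrel, hv, hb, ← hp0, ← hp1, ← hcurr]
              rw [hA]
              exact ih _ _ hpwL
                (by
                  rintro m' hm' jp hjp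
                  injection hm' with hm'
                  rw [← hm']
                  exact hiplt jp hjp)
                (by simp [pvRel, hb])
            · have hA : pvStepA_nearestmin_validPoint x y st ip = st := by
                simp only [pvStepA_nearestmin_validPoint, ← hp0, ← hp1, ← hcurr, if_pos hv]
                simp [hrel, hb]
              rw [hA]
              exact ih _ _ hpwL
                (by
                  rintro m' hm' jp hjp
                  injection hm' with hm'
                  rw [← hm']
                  exact hiplt jp hjp)
                (by simp [pvRel, hb, hrel])
          · have hmin : pvMinPair m (curr, ip.1) = m := by
              unfold pvMinPair
              have : ¬ (curr < m.1 ∨ (curr = m.1 ∧ ip.1 < m.2)) := by omega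
              simp [this]
            have hA : pvStepA_nearestmin_validPoint x y st ip = st := by
              simp only [pvStepA_nearestmin_validPoint, ← hp0, ← hp1, ← hcurr, if_pos hv]
              simp [hrel]
              omega
            rw [hmin, hA]
            exact ih _ _ hpwL
              (by
                rintro m' hm' jp hjp
                injection hm' with hm'
                rw [← hm']
                have hx := hnext jp hjp
                rw [hmin] at hx
                exact hx)
              (by simp [pvRel, hmlt, hrel])
    · have hstep : pvStepB x y o ip = o := by simp [pvStepB, ← hp0, ← hp1, hv]
      have hA : pvStepA_nearestmin_validPoint x y st ip = st := by
        simp [pvStepA_nearestmin_validPoint, ← hp0, ← hp1, hv]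
      rw [hstep, hA]
      exact ih _ _ hpwL
        (by rintro m hm jp hjp; exact ho m hm jp (List.mem_cons_of_mem _ hjp)) hrel

-- a candidate pair comes from a coordinate-sharing point of the list, with its distance
lemma pvMemCands (x y : Int) (points : List (List Int)) (c : Int × Int)
    (h : c ∈ pvCands_nearestmin_validPoint x y points) :
    ∃ p ∈ points, (PySem.List.pyGetD p 0 0 = x ∨ PySem.List.pyGetD p 1 0 = y) ∧
      c.1 = |x - PySem.List.pyGetD p 0 0| + |y - PySem.List.pyGetD p 1 0| := by
  unfold pvCands_nearestmin_validPoint at h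
  obtain ⟨ip, hip, hf⟩ := List.mem_filterMap.mp h
  by_cases hv : PySem.List.pyGetD ip.2 0 0 = x ∨ PySem.List.pyGetD ip.2 1 0 = y
  · rw [if_pos hv] at hf
    obtain ⟨k, hk, hipeq⟩ := (PySem.List.mem_enumerate_iff points 0 ip).mp hip
    refine ⟨ip.2, by rw [hipeq]; exact List.getElem_mem hk, hv, ?_⟩
    injection hf with hf
    rw [← hf]
  · rw [if_neg hv] at hf; cases hf

-- any coordinate-sharing point yields a candidate pair carrying its distance
lemma pvCandOfPoint (x y : Int) (points : List (List Int)) (p : List Int)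
    (hp : p ∈ points) (hv : PySem.List.pyGetD p 0 0 = x ∨ PySem.List.pyGetD p 1 0 = y) :
    ∃ c ∈ pvCands_nearestmin_validPoint x y points,
      c.1 = |x - PySem.List.pyGetD p 0 0| + |y - PySem.List.pyGetD p 1 0| := by
  obtain ⟨k, hk, rfl⟩ := List.mem_iff_getElem.mp hp
  have hmem : ((k : Int), points[k]) ∈ PySem.List.enumerate points := by
    rw [PySem.List.mem_enumerate_iff]
    exact ⟨k, hk, by simp⟩
  refine ⟨(|x - PySem.List.pyGetD points[k] 0 0| + |y - PySem.List.pyGetD points[k] 1 0|, (k : Int)),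
    ?_, rfl⟩
  unfold pvCands_nearestmin_validPoint
  exact List.mem_filterMap.mpr ⟨((k : Int), points[k]), hmem, by simp [hv]⟩

-- ===== VERDICT =====
theorem nearestmin_validPoint_spec : Claim_equal_nearestmin_validPoint := by
  intro x y points _ hpre
  obtain ⟨-, hnear⟩ := hpre
  unfold Spec_nearestmin_validPoint nearestmin_validPoint nearestmin_validPoint_alt
  have hfold := pvFoldB x y (PySem.List.enumerate points) none
  have hinv := pvMainLoop x y (PySem.List.enumerate points) none (-1, 100000)
    (PySem.List.pairwise_lt_enumerate points 0) (by rintro m h; cases h) rfl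
  rw [hfold] at hinv
  cases hC : pvCands_nearestmin_validPoint x y points with
  | nil =>
    unfold pvCands_nearestmin_validPoint at hC
    rw [hC] at hinv
    simp only [pvRel] at hinv
    rw [hinv]
    rfl
  | cons c cs =>
    have hCuf : (PySem.List.enumerate points).filterMap (fun ip =>
        if PySem.List.pyGetD ip.2 0 0 = x ∨ PySem.List.pyGetD ip.2 1 0 = y then
          some (|x - PySem.List.pyGetD ip.2 0 0| + |y - PySem.List.pyGetD ip.2 1 0|, ip.1)
        else none) = c :: cs := hC
    rw [hCuf] at hinv
    simp only [pvRel] at hinv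
    set m := cs.foldl pvMinPair c with hmdef
    obtain ⟨hmmem, hmmin⟩ := pvFoldMin cs c
    rw [← hmdef] at hmmem hmmin
    rw [← hC] at hmmem hmmin
    by_cases hb : m.1 < 100000
    · rw [if_pos hb] at hinv
      rw [hinv]
      cases hs : PySem.List.sorted2 (pvCands_nearestmin_validPoint x y points) Prod.fst Prod.snd with
      | nil =>
        exfalso
        have hperm := PySem.List.sorted2_perm (pvCands_nearestmin_validPoint x y points)
          Prod.fst Prod.snd false
        rw [hs] at hperm
        rw [← hperm.mem_iff] at hmmem
        cases hmmem
      | cons h t =>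
        obtain ⟨hhmem, hhmin⟩ := pvSortedHead _ h t hs
        have hmh : m = h := pvLexLE_antisymm (hmmin h hhmem) (hhmin m hmmem)
        rw [hmh, ← hC, hs]
    · exfalso
      rw [if_neg hb] at hinv
      obtain ⟨p, hp, hpv, _⟩ := pvMemCands x y points m hmmem
      have hex : ∃ q ∈ points, q.getD 0 0 = x ∨ q.getD 1 0 = y :=
        ⟨p, hp, by simpa [PySem.List.pyGetD_ofNat'] using hpv⟩
      obtain ⟨q, hq, hqv, hqd⟩ := hnear hex
      have hqv' : PySem.List.pyGetD q 0 0 = x ∨ PySem.List.pyGetD q 1 0 = y := by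
        simpa [PySem.List.pyGetD_ofNat'] using hqv
      obtain ⟨u, hu, hud⟩ := pvCandOfPoint x y points q hq hqv'
      have hle := hmmin u hu
      simp only [PySem.List.pyGetD_ofNat'] at hud
      unfold pvLexLE at hle
      omega
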